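-- pv_equiv track=rewrite | github.com/GastonMazzei/custom-fragment-shader-4Snaptchat-Spectacles | serverApp/utils.py | correct_headers
-- ===== SOURCE A (Python) =====
-- def correct_headers(data: list ) -> str:
--     """
--     add the headers and/or the variable definition if its not already there
--     """
--
--     # Define those required
--     required = [
-- 	"precision mediump float",
-- 	"out vec4 outColor",
-- 	"in vec3 frgColor",
-- 	"uniform float iGlobalTime",
-- 	]
--
--     # Assume they are all not part of the text
--     is_required = [True for i in range(len(required))]
--
--     # Check if the text already includes some
--     for i in range(len(data)):
--         for j in range(len(required)):
--             if required[j] in data[i]: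
--                 is_required[j] = False
--
--     # Add those required that are not present
--     for i,b in enumerate(is_required):
--         if b:
--             data = [required[i] + ';'] + data
--
--     return data
-- ===== SOURCE B (Python) =====
-- REQUIRED = [
--     "precision mediump float",
--     "out vec4 outColor",
--     "in vec3 frgColor",
--     "uniform float iGlobalTime",
-- ]
--
-- def correct_headers(data: list) -> str:
--     # One joined text instead of nested per-line scans; missing headers prepended in reverse order.
--     text = "\n".join(data)
--     missing = [req for req in REQUIRED if req not in text]
--     return [req + ";" for req in reversed(missing)] + data
-- ===== Notes on version B (the rewrite author's own statement) =====
-- stated objective: simpler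
-- what changed: B joins all lines into one newline-separated text and tests each required header once against that single string (safe because the headers contain no newline), then prepends the missing ones in reverse in one list construction, instead of A's nested per-line/per-header flag loops and repeated list re-prepending.
import Mathlib
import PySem

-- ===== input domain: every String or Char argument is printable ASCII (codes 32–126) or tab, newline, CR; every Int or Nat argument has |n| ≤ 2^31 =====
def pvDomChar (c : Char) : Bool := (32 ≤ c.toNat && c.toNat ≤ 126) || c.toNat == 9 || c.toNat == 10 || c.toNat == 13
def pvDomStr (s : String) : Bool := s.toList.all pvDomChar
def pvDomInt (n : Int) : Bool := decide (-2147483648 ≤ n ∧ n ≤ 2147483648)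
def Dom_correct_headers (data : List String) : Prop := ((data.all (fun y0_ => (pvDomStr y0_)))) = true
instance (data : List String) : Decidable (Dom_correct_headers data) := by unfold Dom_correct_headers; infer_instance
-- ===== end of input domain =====

-- B tests each required header once against one newline-joined text and prepends the
-- missing ones in reverse in a single list construction, instead of A's nested
-- per-line/per-header flag loops and repeated list re-prepending (objective: simpler).

-- the module-level list of required header declarations (shared literal constant)
def pvRequired : List String :=
  ["precision mediump float", "out vec4 outColor", "in vec3 frgColor", "uniform float iGlobalTime"]

-- ===== PORT A =====
def correct_headers (data : List String) : List String :=
  let required := pvRequired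
  -- is_required = [True for i in range(len(required))]
  let is_required := (List.range required.length).map (fun _ => true)
  -- for i in range(len(data)): for j in range(len(required)): if required[j] in data[i]: is_required[j] = False
  let flags := data.foldl (fun fl line =>
      List.zipWith (fun req f => if PySem.Str.isIn req line then false else f) required fl) is_required
  -- for i,b in enumerate(is_required): if b: data = [required[i] + ';'] + data
  (required.zip flags).foldl (fun acc p => if p.2 then (p.1 ++ ";") :: acc else acc) data

-- ===== PORT B =====
def correct_headers_alt (data : List String) : List String :=
  let text := PySem.Str.join "\n" data
  let missing := pvRequired.filter (fun req => !(PySem.Str.isIn req text))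
  ((missing.reverse).map (fun req => req ++ ";")) ++ data

-- ===== PRECONDITION & SPEC =====
def Spec_correct_headers (data : List String) (out : List String) : Prop := out = correct_headers_alt data
instance (data : List String) (out : List String) : Decidable (Spec_correct_headers data out) := by unfold Spec_correct_headers; infer_instance

-- ===== CLAIM (what is proved, stated in full; the proofs are below) =====
def Claim_equal_correct_headers : Prop := ∀ (data : List String), Dom_correct_headers data → Spec_correct_headers data (correct_headers data)

-- ===== LEMMAS AND PROOFS =====

-- a prefix that avoids the separator character stays within the first block
theorem pv_prefix_append_cons {α : Type} {c : α} {r ys : List α} :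
    ∀ {xs : List α}, c ∉ r → r <+: xs ++ c :: ys → r <+: xs := by
  intro xs
  induction xs generalizing r with
  | nil =>
    intro hc hp
    cases r with
    | nil => exact List.nil_prefix
    | cons a r' =>
      rw [List.nil_append, List.cons_prefix_cons] at hp
      exact absurd (hp.1 ▸ List.mem_cons_self) hc
  | cons x xs' ih =>
    intro hc hp
    cases r with
    | nil => exact List.nil_prefix
    | cons a r' =>
      rw [List.cons_append, List.cons_prefix_cons] at hp
      have h2 : c ∉ r' := fun h => hc (List.mem_cons_of_mem _ h)
      exact List.cons_prefix_cons.mpr ⟨hp.1, ih h2 hp.2⟩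

-- an infix that avoids the separator lies in one of the two blocks
theorem pv_infix_append_cons {α : Type} {c : α} {r ys : List α} (hc : c ∉ r) :
    ∀ (xs : List α), (r <:+: xs ++ c :: ys) ↔ (r <:+: xs ∨ r <:+: ys) := by
  intro xs
  constructor
  · induction xs with
    | nil =>
      intro h
      rcases List.infix_cons_iff.mp (by simpa using h) with hp | hi
      · have h0 : r <+: ([] : List α) := pv_prefix_append_cons hc (by simpa using hp)
        have : r = [] := List.prefix_nil.mp h0
        subst this
        exact Or.inr (List.nil_infix)
      · exact Or.inr hi
    | cons x xs' ih =>
      intro h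
      rw [List.cons_append, List.infix_cons_iff] at h
      rcases h with hp | hi
      · exact Or.inl (pv_prefix_append_cons hc hp).isInfix
      · rcases ih hi with h1 | h2
        · exact Or.inl (List.infix_cons h1)
        · exact Or.inr h2
  · rintro (h | h)
    · exact h.trans (List.prefix_append xs (c :: ys)).isInfix
    · exact h.trans ((List.suffix_cons c ys).trans (List.suffix_append xs (c :: ys))).isInfix

-- 'req in "\n".join(data)' agrees with 'any line contains req' when req is nonempty and newline-free
theorem pv_chars_isIn_join (r : List Char) (c : Char) (h1 : r ≠ []) (hc : c ∉ r) :
    ∀ (css : List (List Char)),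
      PySem.Chars.isIn r (PySem.Chars.join [c] css) = css.any (fun cs => PySem.Chars.isIn r cs) := by
  intro css
  induction css with
  | nil =>
    rw [PySem.Chars.join_nil]
    simp only [List.any_nil]
    rw [PySem.Chars.isIn_eq_false_iff]
    intro hinf
    exact h1 (List.eq_nil_of_infix_nil hinf)
  | cons cs t ih =>
    cases t with
    | nil => rw [PySem.Chars.join_singleton]; simp
    | cons cs' t' =>
      rw [PySem.Chars.join_cons_cons]
      rw [Bool.eq_iff_iff]
      rw [PySem.Chars.isIn_iff_infix]
      have hsplit : cs ++ [c] ++ PySem.Chars.join [c] (cs' :: t')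
          = cs ++ c :: PySem.Chars.join [c] (cs' :: t') := by simp
      rw [hsplit, pv_infix_append_cons hc cs]
      rw [← PySem.Chars.isIn_iff_infix, ← PySem.Chars.isIn_iff_infix, ih]
      simp

theorem pv_str_isIn_join (req : String) (data : List String) (h1 : req.toList ≠ [])
    (hc : '\n' ∉ req.toList) :
    PySem.Str.isIn req (PySem.Str.join "\n" data) = data.any (fun line => PySem.Str.isIn req line) := by
  rw [PySem.Str.isIn_eq, PySem.Str.toList_join]
  have : ("\n" : String).toList = ['\n'] := by decide
  rw [this, pv_chars_isIn_join req.toList '\n' h1 hc (data.map String.toList)]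
  simp [List.any_map, Function.comp_def, PySem.Str.isIn_eq]

-- zipWith of a list with itself is a map
theorem pv_zipWith_self {α γ : Type} (f : α → α → γ) (l : List α) :
    List.zipWith f l l = l.map (fun a => f a a) := by
  induction l with
  | nil => rfl
  | cons x t ih => simp only [List.zipWith_cons_cons, List.map_cons, ih]

-- the nested flag loops compute, per required string, "no line contains it"
theorem pv_flags_fold (data : List String) (required : List String) :
    ∀ (φ : String → Bool),
      data.foldl (fun fl line =>
          List.zipWith (fun req f => if PySem.Str.isIn req line then false else f) required fl)
        (required.map φ)
      = required.map (fun req => φ req && !(data.any (fun line => PySem.Str.isIn req line))) := by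
  induction data with
  | nil => intro φ; simp
  | cons line rest ih =>
    intro φ
    rw [List.foldl_cons]
    have hstep :
        List.zipWith (fun req f => if PySem.Str.isIn req line then false else f) required (required.map φ)
          = required.map (fun req => if PySem.Str.isIn req line then false else φ req) := by
      rw [List.zipWith_map_right, pv_zipWith_self]
    rw [hstep, ih]
    apply List.map_congr_left
    intro req _
    simp only [List.any_cons, PySem.Str.isIn_eq]
    by_cases h : PySem.Chars.isIn req.toList line.toList = true
    · simp [h]
    · simp [h]

-- the prepending loop builds the reversed filtered list in front of the data
theorem pv_prepend_fold (l : List (String × Bool)) :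
    ∀ (acc : List String),
      l.foldl (fun a p => if p.2 then (p.1 ++ ";") :: a else a) acc
      = ((l.filter (fun p => p.2)).map (fun p => p.1 ++ ";")).reverse ++ acc := by
  induction l with
  | nil => intro acc; simp
  | cons p t ih =>
    intro acc
    rw [List.foldl_cons]
    by_cases h : p.2 = true
    · rw [if_pos h, ih ((p.1 ++ ";") :: acc)]
      rw [List.filter_cons, if_pos h]
      simp
    · rw [if_neg h, ih acc]
      rw [List.filter_cons, if_neg h]


-- zipping a list with a map over itself, then filtering on the flag, is a plain filter
theorem pv_zip_map_filter (required : List String) (f : String → Bool) :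
    ((required.zip (required.map f)).filter (fun p => p.2)).map (fun p => p.1 ++ ";")
      = (required.filter f).map (fun req => req ++ ";") := by
  induction required with
  | nil => rfl
  | cons r t ih =>
    simp only [List.map_cons, List.zip_cons_cons, List.filter_cons]
    by_cases h : f r = true <;> simp [h, ih]

-- ===== VERDICT (by name: the statement is the Claim_ definition above) =====
theorem correct_headers_spec : Claim_equal_correct_headers := by
  intro data _
  show correct_headers data = correct_headers_alt data
  simp only [correct_headers, correct_headers_alt]
  have hinit : (List.range pvRequired.length).map (fun _ => true)
      = pvRequired.map (fun _ => true) := by rfl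
  rw [hinit, pv_flags_fold data pvRequired (fun _ => true)]
  rw [pv_prepend_fold, pv_zip_map_filter]
  simp only [Bool.true_and]
  have hfilter :
      pvRequired.filter (fun req => !(data.any (fun line => PySem.Str.isIn req line)))
        = pvRequired.filter (fun req => !(PySem.Str.isIn req (PySem.Str.join "\n" data))) := by
    apply List.filter_congr
    intro req hreq
    simp only [pvRequired, List.mem_cons, List.not_mem_nil, or_false] at hreq
    rcases hreq with rfl | rfl | rfl | rfl <;>
      rw [pv_str_isIn_join _ data (by decide) (by decide)]
  rw [hfilter, List.map_reverse]
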